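-- pv_equiv track=rewrite | github.com/alexandraback/datacollection | solutions_5751500831719424_1/Python/gsz/TheRepeater.py | extractCounts
-- ===== SOURCE A (Python) =====
-- def extractCounts(s, pat):
--     counts = []
--     i = 0
--     for c in pat:
--         j = i
--         while j < len(s) and s[j] == c:
--             j += 1
--         counts.append(j - i)
--         i = j
--     return counts
-- ===== SOURCE B (Python) =====
-- def extractCounts(s, pat):
--     # Precompute the run-length encoding of s in one pass (update the last
--     # run or open a new one), then answer each pattern character by walking
--     # the run list with a pointer r that advances only on a match.
--     runs = []
--     for ch in s:
--         if runs and runs[-1][0] == ch: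
--             runs[-1] = (ch, runs[-1][1] + 1)
--         else:
--             runs.append((ch, 1))
--     counts = []
--     r = 0
--     for c in pat:
--         if r < len(runs) and runs[r][0] == c:
--             counts.append(runs[r][1])
--             r += 1
--         else:
--             counts.append(0)
--     return counts
-- ===== Notes on version B (the rewrite author's own statement) =====
-- stated objective: alternative
-- what changed: B precomputes the run-length encoding of s (built back-to-front in one pass) and answers each pattern character by consuming the run list from the front, instead of A's repeated character-by-character index scanning of s.
import Mathlib
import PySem

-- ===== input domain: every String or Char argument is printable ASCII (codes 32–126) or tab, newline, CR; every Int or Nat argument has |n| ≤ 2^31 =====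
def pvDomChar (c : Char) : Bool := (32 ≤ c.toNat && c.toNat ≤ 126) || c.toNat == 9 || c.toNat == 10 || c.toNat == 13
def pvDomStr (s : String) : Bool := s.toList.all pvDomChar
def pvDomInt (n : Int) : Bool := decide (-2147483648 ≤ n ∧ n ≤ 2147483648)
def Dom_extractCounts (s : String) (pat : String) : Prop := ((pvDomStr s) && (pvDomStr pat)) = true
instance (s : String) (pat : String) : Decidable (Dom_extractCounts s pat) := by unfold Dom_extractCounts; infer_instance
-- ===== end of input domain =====

-- B precomputes the run-length encoding of s once and consumes it with a run
-- pointer while walking the pattern, instead of A's per-character index scans of s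
-- (alternative decomposition).

-- ===== PORT A =====
-- inner `while j < len(s) and s[j] == c: j += 1`; returns the final j
def pvRunLen (l : List Char) (c : Char) (j : Nat) : Nat :=
  if h : j < l.length then
    if l[j] = c then pvRunLen l c (j + 1) else j
  else j
termination_by l.length - j

-- `for c in pat:` loop carrying (counts, i)
def pvALoop (l : List Char) (pat : List Char) (counts : List Int) (i : Nat) : List Int :=
  match pat with
  | [] => counts
  | c :: rest =>
      let j := pvRunLen l c i
      pvALoop l rest (counts ++ [(j : Int) - (i : Int)]) j

def extractCounts (s : String) (pat : String) : List Int :=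
  pvALoop s.toList pat.toList [] 0

-- ===== PORT B =====
-- one step of the run-building `for ch in s` loop; B updates runs[-1] or appends,
-- ported with the run list held in REVERSED order (most recent run first) so the
-- update is at the head; pvRLE reverses the fold's state back at the end.
def pvBuild (runs : List (Char × Nat)) (ch : Char) : List (Char × Nat) :=
  match runs with
  | (c, k) :: t => if c = ch then (ch, k + 1) :: t else (ch, 1) :: (c, k) :: t
  | [] => [(ch, 1)]

def pvRLE (l : List Char) : List (Char × Nat) := (l.foldl pvBuild []).reverse

-- `for c in pat:` loop reading the run list through the pointer r
def pvBLoop (runs : List (Char × Nat)) (pat : List Char) (counts : List Int) (r : Nat) : List Int :=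
  match pat with
  | [] => counts
  | c :: rest =>
      if h : r < runs.length then
        if (runs[r]).1 = c then pvBLoop runs rest (counts ++ [((runs[r]).2 : Int)]) (r + 1)
        else pvBLoop runs rest (counts ++ [0]) r
      else pvBLoop runs rest (counts ++ [0]) r

def extractCounts_alt (s : String) (pat : String) : List Int :=
  pvBLoop (pvRLE s.toList) pat.toList [] 0

-- ===== PRECONDITION & SPEC =====
def Spec_extractCounts (s : String) (pat : String) (out : List Int) : Prop := out = extractCounts_alt s pat
instance (s : String) (pat : String) (out : List Int) : Decidable (Spec_extractCounts s pat out) := by unfold Spec_extractCounts; infer_instance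

-- ===== CLAIM (what is proved, stated in full; the proofs are below) =====
def Claim_equal_extractCounts : Prop := ∀ (s : String) (pat : String), Dom_extractCounts s pat → Spec_extractCounts s pat (extractCounts s pat)

-- ===== LEMMAS AND PROOFS =====

-- `rs` is a valid run-length encoding of `l`
def GoodRLE (rs : List (Char × Nat)) (l : List Char) : Prop :=
  l = (rs.map (fun p => List.replicate p.2 p.1)).flatten ∧
  List.IsChain (fun a b => a.1 ≠ b.1) rs ∧ ∀ p ∈ rs, 0 < p.2

-- front-merging RLE as a foldr (what the foldl in pvRLE computes on the reversed list)
def pvRLEr (l : List Char) : List (Char × Nat) := l.foldr (fun ch rs => pvBuild rs ch) []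

theorem pvRunLen_eq (l : List Char) (c : Char) (j : Nat) :
    pvRunLen l c j = j + ((l.drop j).takeWhile (fun x => x = c)).length := by
  unfold pvRunLen
  split
  · rename_i h
    rw [List.drop_eq_getElem_cons h]
    split
    · rename_i hc
      rw [pvRunLen_eq l c (j + 1)]
      simp [hc]
      omega
    · rename_i hc
      simp [hc]
  · rename_i h
    rw [List.drop_eq_nil_of_le (by omega)]
    simp
termination_by l.length - j

theorem takeWhile_replicate_append (c : Char) (k : Nat) (m : List Char) :
    (List.replicate k c ++ m).takeWhile (fun x => x = c)
      = List.replicate k c ++ m.takeWhile (fun x => x = c) := by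
  induction k with
  | zero => simp
  | succ n ih => simp [List.replicate_succ, ih]

theorem goodRLE_rler (l : List Char) : GoodRLE (pvRLEr l) l := by
  induction l with
  | nil => exact ⟨rfl, List.isChain_nil, by simp [pvRLEr]⟩
  | cons ch rest ih =>
    have hstep : pvRLEr (ch :: rest) = pvBuild (pvRLEr rest) ch := rfl
    rw [hstep]
    obtain ⟨hf, hc, hp⟩ := ih
    cases hr : pvRLEr rest with
    | nil =>
      rw [hr] at hf; simp at hf
      exact ⟨by simp [pvBuild, hf], by simp [pvBuild], by simp [pvBuild]⟩
    | cons p t =>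
      obtain ⟨c, k⟩ := p
      rw [hr] at hf hc hp
      by_cases hcc : c = ch
      · subst hcc
        have hk : 0 < k := hp (c, k) (by simp)
        refine ⟨?_, ?_, ?_⟩
        · simp [pvBuild, hf, List.replicate_succ]
        · simp only [pvBuild]
          cases t with
          | nil => exact List.isChain_singleton _
          | cons q t' =>
            have h2 := List.isChain_cons_cons.mp hc
            exact List.isChain_cons_cons.mpr ⟨h2.1, h2.2⟩
        · intro p hp'
          simp only [pvBuild] at hp'
          rcases List.mem_cons.mp hp' with h | h
          · subst h; omega
          · exact hp _ (List.mem_cons_of_mem _ h)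
      · refine ⟨?_, ?_, ?_⟩
        · simp [pvBuild, if_neg hcc, hf]
        · simp only [pvBuild, if_neg hcc]
          exact List.isChain_cons_cons.mpr ⟨fun h => hcc h.symm, hc⟩
        · intro p hp'
          simp only [pvBuild, if_neg hcc] at hp'
          rcases List.mem_cons.mp hp' with h | h
          · subst h; omega
          · exact hp _ h

theorem goodRLE_reverse (rs : List (Char × Nat)) (l : List Char) (h : GoodRLE rs l) :
    GoodRLE rs.reverse l.reverse := by
  obtain ⟨hf, hc, hp⟩ := h
  refine ⟨?_, ?_, fun p hp' => hp p (List.mem_reverse.mp hp')⟩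
  · rw [hf]
    clear hf hc hp
    induction rs with
    | nil => simp
    | cons p t ih => simp [ih]
  · rw [List.isChain_reverse]
    exact hc.imp (fun _ _ h => h.symm)

theorem goodRLE_rle (l : List Char) : GoodRLE (pvRLE l) l := by
  have h1 : pvRLE l = (pvRLEr l.reverse).reverse := by
    unfold pvRLE pvRLEr
    rw [List.foldl_eq_foldr_reverse]
  rw [h1]
  simpa using goodRLE_reverse _ _ (goodRLE_rler l.reverse)

theorem takeWhile_flatten_nil (t : List (Char × Nat)) (c : Char)
    (hc : ∀ q ∈ t.head?, q.1 ≠ c) (hp : ∀ p ∈ t, 0 < p.2) :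
    ((t.map (fun p => List.replicate p.2 p.1)).flatten.takeWhile (fun x => x = c)) = [] := by
  cases t with
  | nil => simp
  | cons q t' =>
    obtain ⟨c1, k1⟩ := q
    have hne : c1 ≠ c := hc (c1, k1) (by simp)
    have hk1 : 0 < k1 := hp (c1, k1) (by simp)
    obtain ⟨k', rfl⟩ : ∃ k', k1 = k' + 1 := ⟨k1 - 1, by omega⟩
    simp [List.replicate_succ, hne]

theorem main_lemma (l : List Char) (pat : List Char) :
    ∀ (runs : List (Char × Nat)) (counts : List Int) (i : Nat) (r : Nat),
      GoodRLE (runs.drop r) (l.drop i) → pvALoop l pat counts i = pvBLoop runs pat counts r := by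
  induction pat with
  | nil => intro runs counts i r _; rfl
  | cons c rest ih =>
    intro runs counts i r hg
    obtain ⟨hf, hc, hp⟩ := hg
    show pvALoop l (c :: rest) counts i = pvBLoop runs (c :: rest) counts r
    rw [pvALoop, pvRunLen_eq, pvBLoop]
    by_cases hr : r < runs.length
    · rw [dif_pos hr]
      have hdrop : runs.drop r = runs[r] :: runs.drop (r + 1) := List.drop_eq_getElem_cons hr
      obtain ⟨⟨c0, k⟩, hpk⟩ : ∃ p : Char × Nat, runs[r] = p := ⟨runs[r], rfl⟩
      rw [hpk] at hdrop
      rw [hdrop] at hf hc hp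
      have hk : 0 < k := hp (c0, k) (by simp)
      by_cases hcc : c0 = c
      · subst hcc
        rw [hpk, if_pos rfl]
        have hhead : ∀ q ∈ (runs.drop (r + 1)).head?, q.1 ≠ c0 := by
          intro q hq
          cases hdt : runs.drop (r + 1) with
          | nil => simp [hdt] at hq
          | cons q' t' =>
            rw [hdt] at hq hc
            simp at hq; subst hq
            exact Ne.symm (List.isChain_cons_cons.mp hc).1
        have htw : ((l.drop i).takeWhile (fun x => x = c0)) = List.replicate k c0 := by
          rw [hf]
          simp only [List.map_cons, List.flatten_cons]
          rw [takeWhile_replicate_append,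
            takeWhile_flatten_nil _ c0 hhead (fun p h => hp p (List.mem_cons_of_mem _ h))]
          simp
        rw [htw]
        have hint : ((i + (List.replicate k c0).length : Nat) : Int) - (i : Int) = (k : Int) := by
          simp only [List.length_replicate]; push_cast; omega
        rw [hint]
        refine ih runs (counts ++ [(k : Int)]) (i + (List.replicate k c0).length) (r + 1) ?_
        have hct : List.IsChain (fun a b => a.1 ≠ b.1) (runs.drop (r + 1)) := by
          cases hdt : runs.drop (r + 1) with
          | nil => exact List.isChain_nil
          | cons q t' => rw [hdt] at hc; exact (List.isChain_cons_cons.mp hc).2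
        refine ⟨?_, hct, fun p h => hp p (List.mem_cons_of_mem _ h)⟩
        have hdd : l.drop (i + (List.replicate k c0).length)
            = (l.drop i).drop (List.replicate k c0).length := by
          rw [List.drop_drop]
        rw [hdd, hf]
        simp only [List.map_cons, List.flatten_cons]
        rw [List.drop_left]
      · rw [hpk, if_neg hcc]
        obtain ⟨k', rfl⟩ : ∃ k', k = k' + 1 := ⟨k - 1, by omega⟩
        have htw : ((l.drop i).takeWhile (fun x => x = c)) = [] := by
          rw [hf]
          simp [List.replicate_succ, hcc]
        rw [htw]
        simpa using ih runs (counts ++ [(0 : Int)]) i r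
          (by rw [hdrop]; exact ⟨hf, hc, hp⟩)
    · rw [dif_neg hr]
      have hre : runs.drop r = [] := List.drop_eq_nil_of_le (by omega)
      rw [hre] at hf
      have hnil : l.drop i = [] := by simpa using hf
      have htw : ((l.drop i).takeWhile (fun x => x = c)) = [] := by rw [hnil]; simp
      rw [htw]
      simpa using ih runs (counts ++ [(0 : Int)]) i r
        (by rw [hre]; exact ⟨by simpa using hnil, List.isChain_nil, by simp⟩)

-- ===== VERDICT (by name: the statement is the Claim_ definition above) =====
theorem extractCounts_spec : Claim_equal_extractCounts := by
  intro s pat _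
  show extractCounts s pat = extractCounts_alt s pat
  unfold extractCounts extractCounts_alt
  exact main_lemma s.toList pat.toList (pvRLE s.toList) [] 0 0 (by simpa using goodRLE_rle s.toList)
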